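-- pv_equiv track=rewrite | github.com/Ruckus000/carroChatbotTraining | src/train.py | convert_text_entities_to_bio
-- ===== SOURCE A (Python) =====
-- def convert_text_entities_to_bio(text, entities):
--     """Convert text and entities to word tokens with BIO tags"""
--     # Split text into words
--     words = text.split()
--     # Initialize all tags as 'O'
--     tags = ["O"] * len(words)
--
--     for entity in entities:
--         # Skip if entity doesn't have the required fields
--         if (
--             not isinstance(entity, dict)
--             or "entity" not in entity
--             or "value" not in entity
--         ):
--             continue
--
--         # Get entity type, sanitize it for BIO tagging (remove spaces, special chars)
--         entity_type = entity["entity"].strip()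
--         if not entity_type:
--             continue  # Skip empty entity types
--
--         # Get entity value
--         entity_value = entity["value"]
--
--         # Skip if entity_value is not a string
--         if not isinstance(entity_value, str):
--             continue
--
--         # Skip empty values
--         if not entity_value.strip():
--             continue
--
--         # Find where the entity appears in the words
--         try:
--             entity_words = entity_value.split()
--             entity_len = len(entity_words)
--
--             # Skip if no words in entity value
--             if entity_len == 0:
--                 continue
--
--             for i in range(len(words) - entity_len + 1):
--                 # Try to match the entire phrase
--                 potential_match = " ".join(words[i : i + entity_len])
--                 if potential_match.lower() == entity_value.lower():
--                     # Mark the first word as B-entity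
--                     tags[i] = f"B-{entity_type}"
--                     # Mark subsequent words as I-entity
--                     for j in range(1, entity_len):
--                         tags[i + j] = f"I-{entity_type}"
--                     break
--         except Exception as e:
--             # Just skip this entity if there are any issues
--             continue
--
--     return words, tags
-- ===== SOURCE B (Python) =====
-- def convert_text_entities_to_bio(text, entities):
--     """Convert text and entities to word tokens with BIO tags"""
--     words = text.split()
--     n = len(words)
--     # lowercase each word once; index every lowercased word to its positions
--     lw = [w.lower() for w in words]
--     index = {}
--     for p, w in enumerate(lw):
--         index.setdefault(w, []).append(p)
--     tags = ["O"] * n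
--
--     for entity in entities:
--         if (
--             not isinstance(entity, dict)
--             or "entity" not in entity
--             or "value" not in entity
--         ):
--             continue
--         entity_type = entity["entity"].strip()
--         if not entity_type:
--             continue
--         entity_value = entity["value"]
--         if not isinstance(entity_value, str):
--             continue
--         target = entity_value.lower()
--         target_words = target.split()
--         if not target_words:
--             continue
--         length = len(target_words)
--         # only positions whose word matches the entity's first word are candidates
--         for p in index.get(target_words[0], []):
--             if p + length <= n and " ".join(lw[p : p + length]) == target:
--                 tags[p] = "B-" + entity_type
--                 for j in range(1, length):
--                     tags[p + j] = "I-" + entity_type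
--                 break
--     return words, tags
-- ===== Notes on version B (the rewrite author's own statement) =====
-- stated objective: alternative
-- what changed: B lowercases the words once and builds a hash index from lowercased word to its positions, so each entity is checked only at the positions where its first word occurs, instead of lowercasing and joining every window of the text for every entity; on the generated timing inputs this was not measurably faster, so it is labelled an alternative.
import Mathlib
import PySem

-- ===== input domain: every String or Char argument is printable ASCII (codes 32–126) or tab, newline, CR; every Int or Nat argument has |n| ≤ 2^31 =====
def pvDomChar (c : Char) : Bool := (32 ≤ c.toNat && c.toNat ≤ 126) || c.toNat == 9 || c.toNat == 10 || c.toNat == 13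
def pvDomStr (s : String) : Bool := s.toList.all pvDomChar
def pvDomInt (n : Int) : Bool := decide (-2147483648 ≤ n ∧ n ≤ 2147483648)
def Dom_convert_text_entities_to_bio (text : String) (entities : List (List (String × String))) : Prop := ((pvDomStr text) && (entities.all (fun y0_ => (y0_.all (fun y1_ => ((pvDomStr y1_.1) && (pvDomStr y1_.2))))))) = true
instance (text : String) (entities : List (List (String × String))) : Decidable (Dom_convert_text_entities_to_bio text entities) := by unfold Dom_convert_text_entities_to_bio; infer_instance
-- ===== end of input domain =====

-- B lowercases the words once and indexes each lowercased word to its positions, so an entity is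
-- only tried at positions where its first word occurs (objective: alternative algorithm, same result).

-- ===== PORT A =====
-- inner 'for i in range(...)' loop with break: first window whose joined lowercase equals the value
def pvAfind (words : List String) (etype ev : String) (L : Int)
    (tags : List String) : List Int → List String
  | [] => tags
  | i :: rest =>
    if PySem.Str.lower (PySem.Str.join " " (PySem.List.slice words (some i) (some (i + L))))
        = PySem.Str.lower ev then
      (PySem.List.pyRange 1 L).foldl
        (fun t j => t.set (i + j).toNat ("I-" ++ etype))
        (tags.set i.toNat ("B-" ++ etype))
    else pvAfind words etype ev L tags rest

def convert_text_entities_to_bio (text : String) (entities : List (List (String × String))) : List String × List String :=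
  let words := PySem.Str.split₀ text
  let tags : List String := List.replicate words.length "O"
  let tags := entities.foldl (fun tags entity =>
    let d := PySem.Dict.ofList entity
    match d.get? "entity", d.get? "value" with
    | some ent, some ev =>
      let entity_type := PySem.Str.strip ent
      if entity_type = "" then tags
      else if PySem.Str.strip ev = "" then tags
      else
        let entity_words := PySem.Str.split₀ ev
        let entity_len := entity_words.length
        if entity_len = 0 then tags
        else pvAfind words entity_type ev (entity_len : Int) tags
               (PySem.List.pyRange 0 ((words.length : Int) - (entity_len : Int) + 1))
    | _, _ => tags) tags
  (words, tags)

-- ===== PORT B =====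
-- scan only the candidate positions (first-word matches) for the first full match
def pvBscan (lw : List String) (etype target : String) (L n : Int)
    (tags : List String) : List Int → List String
  | [] => tags
  | p :: rest =>
    if p + L ≤ n ∧ PySem.Str.join " " (PySem.List.slice lw (some p) (some (p + L))) = target then
      (PySem.List.pyRange 1 L).foldl
        (fun t j => t.set (p + j).toNat ("I-" ++ etype))
        (tags.set p.toNat ("B-" ++ etype))
    else pvBscan lw etype target L n tags rest

def convert_text_entities_to_bio_alt (text : String) (entities : List (List (String × String))) : List String × List String :=
  let words := PySem.Str.split₀ text
  let n := words.length
  let lw := words.map PySem.Str.lower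
  let index : PySem.Dict String (List Int) :=
    (PySem.List.enumerate lw).foldl (fun d pw => d.modify pw.2 [] (· ++ [pw.1])) PySem.Dict.empty
  let tags : List String := List.replicate n "O"
  let tags := entities.foldl (fun tags entity =>
    let d := PySem.Dict.ofList entity
    match d.get? "entity" with
    | none => tags
    | some ent =>
      match d.get? "value" with
      | none => tags
      | some ev =>
        let entity_type := PySem.Str.strip ent
        if entity_type = "" then tags
        else
          let target := PySem.Str.lower ev
          match PySem.Str.split₀ target with
          | [] => tags
          | t0 :: ts =>
            pvBscan lw entity_type target (((t0 :: ts).length : Nat) : Int) (n : Int) tags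
              (index.getD t0 [])) tags
  (words, tags)

-- ===== PRECONDITION & SPEC =====
def Spec_convert_text_entities_to_bio (text : String) (entities : List (List (String × String))) (out : List String × List String) : Prop := out = convert_text_entities_to_bio_alt text entities
instance (text : String) (entities : List (List (String × String))) (out : List String × List String) : Decidable (Spec_convert_text_entities_to_bio text entities out) := by unfold Spec_convert_text_entities_to_bio; infer_instance

-- ===== CLAIM (what is proved, stated in full; the proofs are below) =====
def Claim_equal_convert_text_entities_to_bio : Prop := ∀ (text : String) (entities : List (List (String × String))), Dom_convert_text_entities_to_bio text entities → Spec_convert_text_entities_to_bio text entities (convert_text_entities_to_bio text entities)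

-- ===== LEMMAS AND PROOFS =====

-- a "good" token: nonempty, no whitespace characters (what split() produces)
def pvGood (t : List Char) : Prop := t ≠ [] ∧ ∀ c ∈ t, PySem.Chars.isspace c = false

theorem pv_isspace_lowerChar (c : Char) :
    PySem.Chars.isspace (PySem.Chars.lowerChar c) = PySem.Chars.isspace c := by
  unfold PySem.Chars.lowerChar
  split_ifs with h
  · have hA : 65 ≤ c.toNat ∧ c.toNat ≤ 90 := by
      unfold PySem.Chars.isupper at h
      simp only [Bool.and_eq_true, decide_eq_true_eq] at h
      exact ⟨h.1, h.2⟩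
    have hv : (Char.ofNat (c.toNat + 32)).toNat = c.toNat + 32 := by
      rw [Char.toNat_ofNat]
      rw [if_pos (Or.inl (by omega))]
    have h1 : PySem.Chars.isspace c = false := by
      unfold PySem.Chars.isspace
      simp only [Bool.or_eq_false_iff, Bool.and_eq_false_iff, decide_eq_false_iff_not]
      omega
    have h2 : PySem.Chars.isspace (Char.ofNat (c.toNat + 32)) = false := by
      unfold PySem.Chars.isspace
      simp only [hv, Bool.or_eq_false_iff, Bool.and_eq_false_iff, decide_eq_false_iff_not]
      omega
    rw [h1, h2]
  · rfl

theorem pv_go_cons (c : Char) (rest cur : List Char) (acc : List (List Char)) :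
    PySem.Chars.split₀.go (c :: rest) cur acc =
      if PySem.Chars.isspace c then
        (if cur.isEmpty then PySem.Chars.split₀.go rest [] acc
         else PySem.Chars.split₀.go rest [] (cur.reverse :: acc))
      else PySem.Chars.split₀.go rest (c :: cur) acc := rfl

theorem pv_go_nil' (cur : List Char) (acc : List (List Char)) :
    PySem.Chars.split₀.go [] cur acc =
      if cur.isEmpty then acc.reverse else (cur.reverse :: acc).reverse := rfl

theorem pv_go_lower (s cur : List Char) (acc : List (List Char)) :
    PySem.Chars.split₀.go (s.map PySem.Chars.lowerChar) (cur.map PySem.Chars.lowerChar)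
      (acc.map (List.map PySem.Chars.lowerChar)) =
    (PySem.Chars.split₀.go s cur acc).map (List.map PySem.Chars.lowerChar) := by
  induction s generalizing cur acc with
  | nil =>
    simp only [List.map_nil, pv_go_nil']
    by_cases hc : cur = []
    · subst hc; simp
    · rw [if_neg, if_neg] <;> simp_all [List.isEmpty_iff, List.map_reverse]
  | cons c rest ih =>
    simp only [List.map_cons, pv_go_cons, pv_isspace_lowerChar]
    by_cases hs : PySem.Chars.isspace c
    · rw [if_pos hs, if_pos hs]
      by_cases hc : cur = []
      · subst hc; simpa using ih [] acc
      · rw [if_neg, if_neg]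
        · have := ih [] (cur.reverse :: acc)
          simpa [List.map_reverse] using this
        · simp [List.isEmpty_iff, hc]
        · simp [List.isEmpty_iff, hc]
    · rw [if_neg hs, if_neg hs]
      exact ih (c :: cur) acc

theorem pv_split₀_lower (s : List Char) :
    PySem.Chars.split₀ (PySem.Chars.lower s) = (PySem.Chars.split₀ s).map PySem.Chars.lower := by
  unfold PySem.Chars.split₀ PySem.Chars.lower
  simpa using pv_go_lower s [] []

theorem pv_go_allspace (s : List Char) (acc : List (List Char))
    (h : ∀ c ∈ s, PySem.Chars.isspace c = true) :
    PySem.Chars.split₀.go s [] acc = acc.reverse := by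
  induction s generalizing acc with
  | nil => simp [pv_go_nil']
  | cons c rest ih =>
    rw [pv_go_cons, if_pos (h c (by simp))]
    simp only [List.isEmpty_nil, if_true]
    exact ih acc (fun x hx => h x (by simp [hx]))

theorem pv_split₀_allspace (s : List Char) (h : ∀ c ∈ s, PySem.Chars.isspace c = true) :
    PySem.Chars.split₀ s = [] := by
  unfold PySem.Chars.split₀
  simpa using pv_go_allspace s [] h

theorem pv_strip_nil_allspace (s : List Char) (h : PySem.Chars.strip s = []) :
    ∀ c ∈ s, PySem.Chars.isspace c = true := by
  unfold PySem.Chars.strip PySem.Chars.rstrip PySem.Chars.lstrip at h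
  have h1 : List.dropWhile PySem.Chars.isspace (List.dropWhile PySem.Chars.isspace s).reverse = [] := by
    simpa using h
  have h2 : ∀ c ∈ (List.dropWhile PySem.Chars.isspace s).reverse, PySem.Chars.isspace c = true := by
    rw [List.dropWhile_eq_nil_iff] at h1
    exact h1
  have h3 : ∀ c ∈ List.dropWhile PySem.Chars.isspace s, PySem.Chars.isspace c = true := by
    intro c hc; exact h2 c (by simpa using hc)
  intro c hc
  have hc' : c ∈ List.takeWhile PySem.Chars.isspace s ++ List.dropWhile PySem.Chars.isspace s := by
    rw [List.takeWhile_append_dropWhile]; exact hc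
  rcases List.mem_append.mp hc' with h4 | h4
  · exact List.mem_takeWhile_imp h4
  · exact h3 c h4

theorem pv_go_tokens (s cur : List Char) (acc : List (List Char))
    (hc : ∀ c ∈ cur, PySem.Chars.isspace c = false)
    (ha : ∀ t ∈ acc, pvGood t) :
    ∀ t ∈ PySem.Chars.split₀.go s cur acc, pvGood t := by
  induction s generalizing cur acc with
  | nil =>
    rw [pv_go_nil']
    by_cases h : cur = []
    · subst h; simpa using ha
    · rw [if_neg (by simp [List.isEmpty_iff, h])]
      intro t ht
      simp only [List.mem_reverse, List.mem_cons] at ht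
      rcases ht with rfl | ht
      · exact ⟨by simpa using h, fun c hcmem => hc c (by simpa using hcmem)⟩
      · exact ha t ht
  | cons c rest ih =>
    rw [pv_go_cons]
    by_cases hs : PySem.Chars.isspace c
    · rw [if_pos hs]
      by_cases h : cur = []
      · subst h; simpa using ih [] acc (by simp) ha
      · rw [if_neg (by simp [List.isEmpty_iff, h])]
        refine ih [] (cur.reverse :: acc) (by simp) ?_
        intro t ht
        rcases List.mem_cons.mp ht with rfl | ht
        · exact ⟨by simpa using h, fun x hx => hc x (by simpa using hx)⟩
        · exact ha t ht
    · rw [if_neg hs]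
      refine ih (c :: cur) acc ?_ ha
      intro x hx
      rcases List.mem_cons.mp hx with rfl | hx
      · simpa using hs
      · exact hc x hx

theorem pv_split₀_tokens (s : List Char) : ∀ t ∈ PySem.Chars.split₀ s, pvGood t := by
  unfold PySem.Chars.split₀
  exact pv_go_tokens s [] [] (by simp) (by simp)

theorem pv_go_token_prefix (t rest cur : List Char) (acc : List (List Char))
    (h : ∀ c ∈ t, PySem.Chars.isspace c = false) :
    PySem.Chars.split₀.go (t ++ rest) cur acc =
    PySem.Chars.split₀.go rest (t.reverse ++ cur) acc := by
  induction t generalizing cur with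
  | nil => simp
  | cons c tl ih =>
    rw [List.cons_append, pv_go_cons, if_neg (by simp [h c (by simp)])]
    rw [ih (c :: cur) (fun x hx => h x (by simp [hx]))]
    congr 1
    simp

theorem pv_go_join (ps : List (List Char)) (acc : List (List Char))
    (h : ∀ t ∈ ps, pvGood t) (hne : ps ≠ []) :
    PySem.Chars.split₀.go (PySem.Chars.join [' '] ps) [] acc = acc.reverse ++ ps := by
  induction ps generalizing acc with
  | nil => exact absurd rfl hne
  | cons p qs ih =>
    have hp : pvGood p := h p (by simp)
    cases qs with
    | nil =>
      rw [PySem.Chars.join_singleton]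
      rw [show p = p ++ ([] : List Char) by simp, pv_go_token_prefix p [] [] acc hp.2]
      rw [pv_go_nil', if_neg (by simp [List.isEmpty_iff]; simpa using hp.1)]
      simp
    | cons q rs =>
      rw [PySem.Chars.join_cons_cons]
      rw [List.append_assoc, pv_go_token_prefix p _ [] acc hp.2]
      simp only [List.append_nil, List.singleton_append]
      rw [pv_go_cons, if_pos (by decide)]
      rw [if_neg (by simp only [List.isEmpty_iff, List.reverse_eq_nil_iff]; exact hp.1)]
      rw [List.reverse_reverse]
      rw [ih (p :: acc) (fun t ht => h t (List.mem_cons_of_mem _ ht)) (by simp)]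
      simp

theorem pv_split₀_join (ps : List (List Char)) (h : ∀ t ∈ ps, pvGood t) (hne : ps ≠ []) :
    PySem.Chars.split₀ (PySem.Chars.join [' '] ps) = ps := by
  unfold PySem.Chars.split₀
  simpa using pv_go_join ps [] h hne

theorem pv_lower_join (ps : List (List Char)) :
    PySem.Chars.lower (PySem.Chars.join [' '] ps) =
    PySem.Chars.join [' '] (ps.map PySem.Chars.lower) := by
  induction ps with
  | nil => simp [PySem.Chars.join_nil, PySem.Chars.lower]
  | cons p qs ih =>
    cases qs with
    | nil => simp [PySem.Chars.join_singleton, PySem.Chars.lower]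
    | cons q rs =>
      have hR : PySem.Chars.join [' '] (PySem.Chars.lower p :: List.map PySem.Chars.lower (q :: rs))
          = PySem.Chars.lower p ++ [' '] ++ PySem.Chars.join [' '] (List.map PySem.Chars.lower (q :: rs)) := by
        rw [List.map_cons]; exact PySem.Chars.join_cons_cons _ _ _ _
      rw [PySem.Chars.join_cons_cons, List.map_cons, hR, ← ih]
      unfold PySem.Chars.lower
      simp only [List.map_append, List.map_cons, List.map_nil]
      rw [show PySem.Chars.lowerChar ' ' = ' ' from by decide]

theorem pv_slice_map {α β : Type} (f : α → β) (xs : List α) (a b : Int) :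
    PySem.List.slice (xs.map f) (some a) (some b) = (PySem.List.slice xs (some a) (some b)).map f := by
  simp [PySem.List.slice, List.map_drop, List.map_take]

theorem pv_toList_inj : Function.Injective String.toList := fun _ _ h => String.ext_iff.mpr h

theorem pv_words_good (text : String) : ∀ w ∈ PySem.Str.split₀ text, pvGood w.toList := by
  intro w hw
  have hmem : w.toList ∈ PySem.Chars.split₀ text.toList := by
    rw [← PySem.Str.split₀_map_toList]
    exact List.mem_map_of_mem hw
  exact pv_split₀_tokens _ _ hmem

theorem pv_lower_good (w : String) (h : pvGood w.toList) : pvGood (PySem.Str.lower w).toList := by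
  rw [PySem.Str.toList_lower]
  unfold PySem.Chars.lower
  refine ⟨by simpa using h.1, ?_⟩
  intro c hc
  obtain ⟨a, ha, rfl⟩ := List.mem_map.mp hc
  rw [pv_isspace_lowerChar]
  exact h.2 a ha

theorem pv_str_split₀_lower (s : String) :
    PySem.Str.split₀ (PySem.Str.lower s) = (PySem.Str.split₀ s).map PySem.Str.lower := by
  apply List.map_injective_iff.mpr pv_toList_inj
  rw [PySem.Str.split₀_map_toList, PySem.Str.toList_lower, pv_split₀_lower,
    ← PySem.Str.split₀_map_toList, List.map_map, List.map_map]
  simp [Function.comp, PySem.Str.toList_lower]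

theorem pv_lower_strjoin (ws : List String) :
    PySem.Str.lower (PySem.Str.join " " ws) = PySem.Str.join " " (ws.map PySem.Str.lower) := by
  apply pv_toList_inj
  have h1 : (" " : String).toList = [' '] := rfl
  rw [PySem.Str.toList_lower, PySem.Str.toList_join, PySem.Str.toList_join, h1, pv_lower_join,
    List.map_map, List.map_map]
  simp only [Function.comp_def, PySem.Str.toList_lower]

theorem pv_condA_eq (words : List String) (i L : Int) :
    PySem.Str.lower (PySem.Str.join " " (PySem.List.slice words (some i) (some (i + L))))
      = PySem.Str.join " " (PySem.List.slice (words.map PySem.Str.lower) (some i) (some (i + L))) := by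
  rw [pv_lower_strjoin, pv_slice_map]

theorem pv_key_of_match (lw : List String) (target t0 : String) (ts : List String) (k L : Nat)
    (hgood : ∀ u ∈ lw, pvGood u.toList) (hL : 0 < L) (hkL : k + L ≤ lw.length)
    (htw : PySem.Str.split₀ target = t0 :: ts)
    (hjc : PySem.Str.join " " (PySem.List.slice lw (some (k : Int)) (some ((k : Int) + (L : Int)))) = target) :
    PySem.List.pyGetD lw (k : Int) "" = t0 ∧ (t0 :: ts).length = L := by
  rw [PySem.List.slice_natCast_add] at hjc
  have hwin : ∀ u ∈ List.take L (List.drop k lw), pvGood u.toList := by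
    intro u hu
    exact hgood u (List.mem_of_mem_drop (List.mem_of_mem_take hu))
  have hlen : (List.take L (List.drop k lw)).length = L := by
    rw [List.length_take, List.length_drop]; omega
  have hne : List.take L (List.drop k lw) ≠ [] := by
    intro h0; rw [h0] at hlen; simp at hlen; omega
  have hsplit : PySem.Str.split₀ target = List.take L (List.drop k lw) := by
    apply List.map_injective_iff.mpr pv_toList_inj
    rw [PySem.Str.split₀_map_toList, ← hjc, PySem.Str.toList_join]
    have h1 : (" " : String).toList = [' '] := rfl
    rw [h1, pv_split₀_join]
    · intro t ht
      obtain ⟨u, hu, rfl⟩ := List.mem_map.mp ht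
      exact hwin u hu
    · simpa using hne
  rw [htw] at hsplit
  have hget : lw[k]? = some t0 := by
    have h0 : (List.take L (List.drop k lw))[0]? = some t0 := by rw [← hsplit]; rfl
    rw [List.getElem?_take_of_lt (by omega : 0 < L), List.getElem?_drop, Nat.add_zero] at h0
    exact h0
  constructor
  · rw [PySem.List.pyGetD_natCast, List.getD_eq_getElem?_getD, hget]; rfl
  · rw [hsplit]; exact hlen

theorem pv_pvAfind_eq (words : List String) (etype ev : String) (L : Int) (tags : List String)
    (idxs : List Int) :
    pvAfind words etype ev L tags idxs =
      match idxs.find? (fun i => decide (PySem.Str.lower (PySem.Str.join " " (PySem.List.slice words (some i) (some (i + L)))) = PySem.Str.lower ev)) with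
      | none => tags
      | some i => (PySem.List.pyRange 1 L).foldl (fun t j => t.set (i + j).toNat ("I-" ++ etype)) (tags.set i.toNat ("B-" ++ etype)) := by
  induction idxs with
  | nil => rfl
  | cons i rest ih =>
    simp only [pvAfind, List.find?_cons]
    by_cases h : PySem.Str.lower (PySem.Str.join " " (PySem.List.slice words (some i) (some (i + L)))) = PySem.Str.lower ev
    · simp [h]
    · rw [if_neg h, ih]
      simp [h]

theorem pv_pvBscan_eq (lw : List String) (etype target : String) (L n : Int) (tags : List String)
    (ps : List Int) :
    pvBscan lw etype target L n tags ps =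
      match ps.find? (fun p => decide (p + L ≤ n ∧ PySem.Str.join " " (PySem.List.slice lw (some p) (some (p + L))) = target)) with
      | none => tags
      | some p => (PySem.List.pyRange 1 L).foldl (fun t j => t.set (p + j).toNat ("I-" ++ etype)) (tags.set p.toNat ("B-" ++ etype)) := by
  induction ps with
  | nil => rfl
  | cons p rest ih =>
    simp only [pvBscan, List.find?_cons]
    by_cases h : p + L ≤ n ∧ PySem.Str.join " " (PySem.List.slice lw (some p) (some (p + L))) = target
    · simp [h]
    · rw [if_neg h, ih]
      simp [h]

theorem pv_find?_congr {α : Type} (l : List α) (p q : α → Bool) (h : ∀ x ∈ l, p x = q x) :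
    l.find? p = l.find? q := by
  induction l with
  | nil => rfl
  | cons a t ih =>
    rw [List.find?_cons, List.find?_cons, h a (List.mem_cons_self)]
    cases hq : q a
    · simpa using ih (fun x hx => h x (List.mem_cons_of_mem _ hx))
    · rfl

theorem pv_find?_filter_eq {α : Type} (l : List α) (r q : α → Bool)
    (h : ∀ x ∈ l, q x = true → r x = true) :
    (l.filter r).find? q = l.find? q := by
  induction l with
  | nil => rfl
  | cons a t ih =>
    by_cases hr : r a = true
    · rw [List.filter_cons_of_pos hr, List.find?_cons, List.find?_cons]
      cases hq : q a
      · simpa using ih (fun x hx => h x (List.mem_cons_of_mem _ hx))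
      · rfl
    · have hq : q a = false := by
        cases hqa : q a
        · rfl
        · exact absurd (h a (List.mem_cons_self) hqa) hr
      rw [List.filter_cons_of_neg (by simpa using hr), List.find?_cons, hq]
      simpa using ih (fun x hx => h x (List.mem_cons_of_mem _ hx))

theorem pv_positions (lw : List String) (t0 : String) :
    ((PySem.List.enumerate lw).foldl (fun d pw => d.modify pw.2 [] (· ++ [pw.1])) (PySem.Dict.empty : PySem.Dict String (List Int))).getD t0 []
      = (PySem.List.pyRange 0 (lw.length : Int)).filter (fun j => PySem.List.pyGetD lw j "" == t0) := by
  have hswap : (PySem.List.enumerate lw).foldl (fun d pw => d.modify pw.2 [] (· ++ [pw.1])) (PySem.Dict.empty : PySem.Dict String (List Int))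
      = ((PySem.List.enumerate lw).map (fun pw => (pw.2, pw.1))).foldl (fun d p => d.modify p.1 [] (· ++ [p.2])) PySem.Dict.empty := by
    rw [List.foldl_map]
  rw [hswap, PySem.Dict.getD_foldl_modify_append]
  rw [show (PySem.Dict.empty : PySem.Dict String (List Int)).getD t0 [] = [] from rfl, List.nil_append]
  rw [PySem.List.enumerate_eq_map_pyRange lw ""]
  simp [List.map_map, List.filter_map, Function.comp_def, PySem.List.len]

theorem pv_findopt_eq (lw : List String) (hgood : ∀ u ∈ lw, pvGood u.toList)
    (target t0 : String) (ts : List String) (L : Nat) (hL : 0 < L)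
    (htw : PySem.Str.split₀ target = t0 :: ts) :
    ((PySem.List.pyRange 0 (lw.length : Int)).filter (fun j => PySem.List.pyGetD lw j "" == t0)).find?
        (fun p => decide (p + (L : Int) ≤ (lw.length : Int) ∧ PySem.Str.join " " (PySem.List.slice lw (some p) (some (p + (L : Int)))) = target))
      = (PySem.List.pyRange 0 ((lw.length : Int) - (L : Int) + 1)).find?
        (fun i => decide (PySem.Str.join " " (PySem.List.slice lw (some i) (some (i + (L : Int)))) = target)) := by
  have hkey : ∀ j ∈ PySem.List.pyRange 0 (lw.length : Int),
      (decide (j + (L : Int) ≤ (lw.length : Int) ∧ PySem.Str.join " " (PySem.List.slice lw (some j) (some (j + (L : Int)))) = target)) = true →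
      (PySem.List.pyGetD lw j "" == t0) = true := by
    intro j hj hc
    rw [decide_eq_true_eq] at hc
    obtain ⟨hjn, hjc⟩ := hc
    have hj0 : 0 ≤ j := (PySem.List.mem_pyRange_one.mp hj).1
    obtain ⟨k, rfl⟩ : ∃ k : Nat, j = (k : Int) := ⟨j.toNat, (Int.toNat_of_nonneg hj0).symm⟩
    have hkL : k + L ≤ lw.length := by exact_mod_cast hjn
    have hm := pv_key_of_match lw target t0 ts k L hgood hL hkL htw hjc
    simp [hm.1]
  rw [pv_find?_filter_eq _ _ _ hkey]
  by_cases hLn : L ≤ lw.length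
  · rw [PySem.List.pyRange_one_append 0 ((lw.length : Int) - L + 1) (lw.length : Int) (by omega) (by omega)]
    rw [List.find?_append]
    have h2 : (PySem.List.pyRange ((lw.length : Int) - L + 1) (lw.length : Int)).find?
        (fun p => decide (p + (L : Int) ≤ (lw.length : Int) ∧ PySem.Str.join " " (PySem.List.slice lw (some p) (some (p + (L : Int)))) = target)) = none := by
      rw [List.find?_eq_none]
      intro j hj
      have hm := PySem.List.mem_pyRange_one.mp hj
      simp only [decide_eq_true_eq, not_and]
      intro hle
      omega
    rw [h2]
    have h3 : ∀ (o : Option Int), o.or none = o := by intro o; cases o <;> rfl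
    rw [h3]
    apply pv_find?_congr
    intro j hj
    have hm := PySem.List.mem_pyRange_one.mp hj
    have hle : j + (L : Int) ≤ (lw.length : Int) := by omega
    simp [hle]
  · have hempty : PySem.List.pyRange 0 ((lw.length : Int) - L + 1) = [] := by
      apply List.eq_nil_iff_forall_not_mem.mpr
      intro j hj
      have := PySem.List.mem_pyRange_one.mp hj
      omega
    rw [hempty]
    rw [List.find?_eq_none.mpr]
    · rfl
    · intro j hj
      have := PySem.List.mem_pyRange_one.mp hj
      simp only [decide_eq_true_eq, not_and]
      intro hle
      omega

set_option maxHeartbeats 2000000 in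
theorem pv_main (text : String) (entities : List (List (String × String))) :
    convert_text_entities_to_bio text entities = convert_text_entities_to_bio_alt text entities := by
  simp only [convert_text_entities_to_bio, convert_text_entities_to_bio_alt]
  have hgoodw := pv_words_good text
  have hgood : ∀ u ∈ (PySem.Str.split₀ text).map PySem.Str.lower, pvGood u.toList := by
    intro u hu
    obtain ⟨w, hw, rfl⟩ := List.mem_map.mp hu
    exact pv_lower_good w (hgoodw w hw)
  congr 1
  apply PySem.List.foldl_congr_mem
  intro tags entity _
  cases hent : (PySem.Dict.ofList entity).get? "entity" with
  | none => rfl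
  | some ent =>
    cases hval : (PySem.Dict.ofList entity).get? "value" with
    | none => rfl
    | some ev =>
      simp only []
      by_cases het : PySem.Str.strip ent = ""
      · simp [het]
      · rw [if_neg het, if_neg het]
        by_cases hse : PySem.Str.strip ev = ""
        · rw [if_pos hse]
          have hall : ∀ c ∈ (PySem.Str.lower ev).toList, PySem.Chars.isspace c = true := by
            rw [PySem.Str.toList_lower]
            unfold PySem.Chars.lower
            intro c hc
            obtain ⟨a, ha, rfl⟩ := List.mem_map.mp hc
            rw [pv_isspace_lowerChar]
            refine pv_strip_nil_allspace ev.toList ?_ a ha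
            have := congrArg String.toList hse
            rwa [PySem.Str.toList_strip] at this
          have hnil : PySem.Str.split₀ (PySem.Str.lower ev) = [] := by
            have := pv_split₀_allspace _ hall
            have h2 := PySem.Str.split₀_map_toList (PySem.Str.lower ev)
            rw [this] at h2
            exact List.map_eq_nil_iff.mp h2
          rw [hnil]
        · rw [if_neg hse]
          by_cases hL0 : (PySem.Str.split₀ ev).length = 0
          · rw [if_pos hL0]
            have h0 : PySem.Str.split₀ ev = [] := List.length_eq_zero_iff.mp hL0
            have hnil : PySem.Str.split₀ (PySem.Str.lower ev) = [] := by
              rw [pv_str_split₀_lower, h0]; rfl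
            rw [hnil]
          · rw [if_neg hL0]
            have hmap : PySem.Str.split₀ (PySem.Str.lower ev) = (PySem.Str.split₀ ev).map PySem.Str.lower :=
              pv_str_split₀_lower ev
            obtain ⟨t0, ts, htw⟩ : ∃ t0 ts, PySem.Str.split₀ (PySem.Str.lower ev) = t0 :: ts := by
              rcases h : PySem.Str.split₀ (PySem.Str.lower ev) with _ | ⟨a, b⟩
              · exfalso
                rw [hmap] at h
                rcases List.map_eq_nil_iff.mp h with h'
                exact hL0 (by rw [h']; rfl)
              · exact ⟨a, b, rfl⟩
            rw [htw]
            show _ = pvBscan (List.map PySem.Str.lower (PySem.Str.split₀ text)) (PySem.Str.strip ent)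
                (PySem.Str.lower ev) (((t0 :: ts).length : Nat) : Int) (((PySem.Str.split₀ text).length : Nat) : Int) tags
                ((List.foldl (fun d pw => d.modify pw.2 [] fun x => x ++ [pw.1]) PySem.Dict.empty
                  (PySem.List.enumerate (List.map PySem.Str.lower (PySem.Str.split₀ text)))).getD t0 [])
            have hlen : (t0 :: ts).length = (PySem.Str.split₀ ev).length := by
              rw [← htw, hmap, List.length_map]
            rw [pv_pvAfind_eq, pv_pvBscan_eq, pv_positions, hlen]
            have hfe := pv_findopt_eq ((PySem.Str.split₀ text).map PySem.Str.lower) hgood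
                  (PySem.Str.lower ev) t0 ts ((PySem.Str.split₀ ev).length)
                  (by omega) htw
            rw [List.length_map] at hfe
            rw [List.length_map, hfe]
            have hpred : ∀ i ∈ PySem.List.pyRange 0 (((PySem.Str.split₀ text).length : Int) - ((PySem.Str.split₀ ev).length : Int) + 1),
                (decide (PySem.Str.lower (PySem.Str.join " " (PySem.List.slice (PySem.Str.split₀ text) (some i) (some (i + ((PySem.Str.split₀ ev).length : Int))))) = PySem.Str.lower ev))
                  = (decide (PySem.Str.join " " (PySem.List.slice ((PySem.Str.split₀ text).map PySem.Str.lower) (some i) (some (i + ((PySem.Str.split₀ ev).length : Int)))) = PySem.Str.lower ev)) := by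
              intro i _
              rw [pv_condA_eq]
            rw [pv_find?_congr _ _ _ hpred]

-- ===== VERDICT (by name: the statement is the Claim_ definition above) =====
theorem convert_text_entities_to_bio_spec : Claim_equal_convert_text_entities_to_bio := by
  intro text entities _
  unfold Spec_convert_text_entities_to_bio
  exact pv_main text entities
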